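-- pv_equiv track=rewrite | github.com/wzygxr/shuati | class026_BinarySearch/BinarySearchProblems.py | find_closest_sum
-- ===== SOURCE A (Python) =====
-- def find_closest_sum(A, B, C, X):
--     """
--     杭电OJ: 查找最接近的元素
--     题目来源: http://acm.hdu.edu.cn/showproblem.php?pid=2141
--
--     题目描述:
--     给定三个数组A、B、C，以及多个查询X。对于每个查询，判断是否存在a∈A, b∈B, c∈C，使得a+b+c=X。
--
--     思路分析:
--     1. 将A+B的所有可能和存储在一个数组中
--     2. 对这个和数组进行排序
--     3. 对于每个查询X，使用二分查找在A+B的和数组中查找是否存在X-c（c∈C）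
--
--     时间复杂度: O(L*M + N*log(L*M))
--     空间复杂度: O(L*M)
--     是否最优解: 是
--
--     :param A: 数组A
--     :param B: 数组B
--     :param C: 数组C
--     :param X: 查询值
--     :return: 是否存在满足条件的组合
--     """
--     n = len(A)
--     sumAB = []
--     for a in A:
--         for b in B:
--             sumAB.append(a + b)
--     sumAB.sort()
--
--     for c in C:
--         target = X - c
--         left, right = 0, len(sumAB) - 1
--         while left <= right:
--             mid = left + ((right - left) >> 1)
--             if sumAB[mid] == target:
--                 return True
--             elif sumAB[mid] < target:
--                 left = mid + 1
--             else:
--                 right = mid - 1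
--
--     return False
-- ===== SOURCE B (Python) =====
-- def find_closest_sum(A, B, C, X):
--     for a in A:
--         for b in B:
--             for c in C:
--                 if a + b + c == X:
--                     return True
--     return False
-- ===== Notes on version B (the rewrite author's own statement) =====
-- stated objective: simpler
-- what changed: Replaced the build-sorted-A+B-table-then-binary-search-per-c strategy with a direct triple nested scan that returns on the first matching triple, building no auxiliary table and doing no sort; on the timed generated inputs this early exit made B measurably faster, though B's worst case is O(L*M*N).
import Mathlib
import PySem

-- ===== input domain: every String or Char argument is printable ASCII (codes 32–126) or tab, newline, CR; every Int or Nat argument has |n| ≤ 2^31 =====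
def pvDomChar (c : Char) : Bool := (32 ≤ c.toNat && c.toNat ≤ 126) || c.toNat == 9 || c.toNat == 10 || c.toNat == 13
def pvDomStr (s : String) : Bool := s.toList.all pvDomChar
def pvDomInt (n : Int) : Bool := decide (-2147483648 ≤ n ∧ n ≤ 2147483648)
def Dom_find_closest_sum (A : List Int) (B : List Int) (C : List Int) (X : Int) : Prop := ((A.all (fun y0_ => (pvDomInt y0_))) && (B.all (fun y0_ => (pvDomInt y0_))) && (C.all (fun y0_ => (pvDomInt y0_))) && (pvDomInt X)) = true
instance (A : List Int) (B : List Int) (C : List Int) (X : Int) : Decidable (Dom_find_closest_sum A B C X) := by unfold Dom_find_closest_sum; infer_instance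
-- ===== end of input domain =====

-- ===== PORT A =====
-- One honest line: B replaces A's sorted A+B sum table + per-c binary search with a
-- direct triple nested scan (simpler); return values proved equal on all of Dom.

-- midpoint bound used by the port's termination proof
theorem pvFloordiv2_bounds (d : Int) (h : 0 ≤ d) :
    0 ≤ PySem.Int.floordiv d 2 ∧ PySem.Int.floordiv d 2 ≤ d := by
  have hb := PySem.Int.floordiv_two_mid_bounds (lo := 0) (hi := d) h
  rw [zero_add] at hb
  exact hb

-- binary search loop of A, literal: while left <= right: mid = left + ((right-left) >> 1); ...
def pvBSearch (xs : List Int) (target : Int) (left right : Int) : Bool :=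
  if _h : left ≤ right then
    let mid := left + PySem.Int.floordiv (right - left) 2
    match PySem.List.pyGet? xs mid with
    | some v =>
      if v = target then true
      else if v < target then pvBSearch xs target (mid + 1) right
      else pvBSearch xs target left (mid - 1)
    | none => false   -- unreachable for 0 ≤ left, right < len (Python IndexError)
  else false
termination_by (right + 1 - left).toNat
decreasing_by
  all_goals
    have hb := pvFloordiv2_bounds (right - left) (by omega)
    omega

def find_closest_sum (A : List Int) (B : List Int) (C : List Int) (X : Int) : Bool :=
  let _n := A.length
  let sumAB := A.foldl (fun acc a => B.foldl (fun acc2 b => acc2 ++ [a + b]) acc) []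
  let sumAB := PySem.List.sorted sumAB (fun x => x) false
  C.any (fun c => pvBSearch sumAB (X - c) 0 ((sumAB.length : Int) - 1))

-- ===== PORT B =====
def find_closest_sum_alt (A : List Int) (B : List Int) (C : List Int) (X : Int) : Bool :=
  A.any (fun a => B.any (fun b => C.any (fun c => a + b + c == X)))

-- ===== PRECONDITION & SPEC =====
def Spec_find_closest_sum (A : List Int) (B : List Int) (C : List Int) (X : Int) (out : Bool) : Prop := out = find_closest_sum_alt A B C X
instance (A : List Int) (B : List Int) (C : List Int) (X : Int) (out : Bool) : Decidable (Spec_find_closest_sum A B C X out) := by unfold Spec_find_closest_sum; infer_instance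

-- ===== CLAIM (what is proved, stated in full; the proofs are below) =====
def Claim_equal_find_closest_sum : Prop := ∀ (A : List Int) (B : List Int) (C : List Int) (X : Int), Dom_find_closest_sum A B C X → Spec_find_closest_sum A B C X (find_closest_sum A B C X)

-- ===== LEMMAS AND PROOFS =====

theorem pvSumAB_eq (A B : List Int) :
    A.foldl (fun acc a => B.foldl (fun acc2 b => acc2 ++ [a + b]) acc) []
      = A.flatMap (fun a => B.map (fun b => a + b)) := by
  simp only [PySem.List.foldl_append_singleton_eq_map]
  simpa using PySem.List.foldl_append_eq_flatMap (l := A)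
    (g := fun a => B.map (fun b => a + b)) (acc := [])

theorem pvBSearch_sound (xs : List Int) (t l r : Int)
    (h : pvBSearch xs t l r = true) : t ∈ xs := by
  fun_induction pvBSearch xs t l r
  all_goals simp_all
  next hv => exact PySem.List.mem_of_pyGet?_eq_some xs hv
theorem pvBSearch_complete (n : Nat) (xs : List Int) (t : Int)
    (hs : xs.Pairwise (· ≤ ·)) :
    ∀ (l r : Int) (i : Nat), (r + 1 - l).toNat ≤ n → 0 ≤ l → r < (xs.length : Int) →
      (hi : i < xs.length) → l ≤ (i : Int) → (i : Int) ≤ r → xs[i] = t →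
      pvBSearch xs t l r = true := by
  have hord : ∀ (i j : Nat) (hi : i < xs.length) (hj : j < xs.length), i ≤ j → xs[i] ≤ xs[j] := by
    intro i j hi hj hij
    rcases Nat.lt_or_ge i j with h | h
    · exact (List.pairwise_iff_getElem.mp hs) i j hi hj h
    · have : i = j := by omega
      subst this; exact le_refl _
  induction n with
  | zero => intro l r i hn hl hr hi hli hir ht; omega
  | succ n ih =>
    intro l r i hn hl hr hi hli hir ht
    have hlr : l ≤ r := by omega
    have hb := pvFloordiv2_bounds (r - l) (by omega)
    have hm0 : 0 ≤ l + PySem.Int.floordiv (r - l) 2 := by omega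
    have hmlen : l + PySem.Int.floordiv (r - l) 2 < (xs.length : Int) := by omega
    have hget := PySem.List.pyGet?_eq_some_getElem xs hm0 hmlen
    have hmnat : ((l + PySem.Int.floordiv (r - l) 2).toNat : Int) = l + PySem.Int.floordiv (r - l) 2 := by omega
    rw [pvBSearch, dif_pos hlr]
    simp only [hget]
    split_ifs with h1 h2
    · rfl
    · have hmi : (l + PySem.Int.floordiv (r - l) 2).toNat < i := by
        rcases Nat.lt_or_ge (l + PySem.Int.floordiv (r - l) 2).toNat i with h | h
        · exact h
        · exact absurd (ht ▸ hord i _ hi (by omega) h) (by omega)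
      exact ih (l + PySem.Int.floordiv (r - l) 2 + 1) r i (by omega) (by omega) hr hi (by omega) hir ht
    · have h2' : t < xs[(l + PySem.Int.floordiv (r - l) 2).toNat] := by
        rcases lt_or_gt_of_ne (Ne.symm h1) with h | h
        · exact h
        · exact absurd h h2
      have him : i < (l + PySem.Int.floordiv (r - l) 2).toNat := by
        rcases Nat.lt_or_ge i (l + PySem.Int.floordiv (r - l) 2).toNat with h | h
        · exact h
        · exact absurd (ht ▸ hord _ i (by omega) hi h) (by omega)
      exact ih l (l + PySem.Int.floordiv (r - l) 2 - 1) i (by omega) hl (by omega) hi hli (by omega) ht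
theorem pvBSearch_iff_mem (xs : List Int) (t : Int) (hs : xs.Pairwise (· ≤ ·)) :
    pvBSearch xs t 0 ((xs.length : Int) - 1) = true ↔ t ∈ xs := by
  constructor
  · exact pvBSearch_sound xs t 0 _
  · intro hm
    obtain ⟨i, hi, ht⟩ := List.mem_iff_getElem.mp hm
    exact pvBSearch_complete xs.length xs t hs 0 _ i (by omega) (by omega) (by omega)
      hi (by omega) (by omega) ht

-- ===== VERDICT (by name: the statement is the Claim_ definition above) =====
theorem find_closest_sum_spec : Claim_equal_find_closest_sum := by
  intro A B C X _hd
  unfold Spec_find_closest_sum find_closest_sum find_closest_sum_alt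
  simp only [pvSumAB_eq]
  rw [Bool.eq_iff_iff]
  have hsort : (PySem.List.sorted (A.flatMap fun a => B.map (fun b => a + b))
      (fun x => x) false).Pairwise (· ≤ ·) :=
    PySem.List.sorted_pairwise (A.flatMap fun a => B.map (fun b => a + b)) (fun x => x)
  simp only [List.any_eq_true, pvBSearch_iff_mem _ _ hsort, PySem.List.mem_sorted,
    List.mem_flatMap, List.mem_map, beq_iff_eq]
  constructor
  · rintro ⟨c, hc, a, ha, b, hb, hx⟩
    exact ⟨a, ha, b, hb, c, hc, by omega⟩
  · rintro ⟨a, ha, b, hb, c, hc, hx⟩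
    exact ⟨c, hc, a, ha, b, hb, by omega⟩
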